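-- pv_equiv track=rewrite | github.com/T-Sikes/Volunteer_Database_Manager | backend/notifications/views.py | _find_event_by_name
-- ===== SOURCE A (Python) =====
-- EVENTS = [
--     {"name": "Community Clean-Up", "date": "2025-12-15", "location": "Central Park"},
--     {"name": "Food Drive", "date": "2025-12-20", "location": "Community Center"},
--     {"name": "Charity Concert", "date": "2025-12-25", "location": "City Hall"},
--     {"name": "Soup Kitchen", "date": "2025-10-16", "location": "Some building"},
--     {"name": "Plant Trees", "date": "2025-10-15", "location": "Pleasant Park"},
--     {"name": "Charity Run", "date": "2025-11-15", "location": "Camp Nou"},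
-- ]
--
-- def _find_event_by_name(name):
--     if not name:
--         return None
--     name = name.strip().lower()
--     for e in EVENTS:
--         if e["name"].strip().lower() == name:
--             return e
--     return None
-- ===== SOURCE B (Python) =====
-- EVENTS = [
--     {"name": "Community Clean-Up", "date": "2025-12-15", "location": "Central Park"},
--     {"name": "Food Drive", "date": "2025-12-20", "location": "Community Center"},
--     {"name": "Charity Concert", "date": "2025-12-25", "location": "City Hall"},
--     {"name": "Soup Kitchen", "date": "2025-10-16", "location": "Some building"},
--     {"name": "Plant Trees", "date": "2025-10-15", "location": "Pleasant Park"},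
--     {"name": "Charity Run", "date": "2025-11-15", "location": "Camp Nou"},
-- ]
--
-- # Stage 1 (done once): a list of (normalized name, event) pairs sorted by the
-- # normalized name.  Correct because the normalized names are pairwise distinct,
-- # so the first match of A's scan is the unique match found by binary search.
-- _SORTED_EVENTS = sorted(((e["name"].strip().lower(), e) for e in EVENTS),
--                         key=lambda p: p[0])
--
-- def _find_event_by_name(name):
--     if not name:
--         return None
--     key = name.strip().lower()
--     # Stage 2: binary search (bisect_left by hand) over the sorted index.
--     lo, hi = 0, len(_SORTED_EVENTS)
--     while lo < hi:
--         mid = (lo + hi) // 2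
--         if _SORTED_EVENTS[mid][0] < key:
--             lo = mid + 1
--         else:
--             hi = mid
--     if lo < len(_SORTED_EVENTS) and _SORTED_EVENTS[lo][0] == key:
--         return _SORTED_EVENTS[lo][1]
--     return None
-- ===== Notes on version B (the rewrite author's own statement) =====
-- stated objective: alternative
-- what changed: Replaced A's per-call linear scan (normalizing each stored name on every call) with a one-time sorted index of (normalized name, event) pairs queried by a hand-written bisect_left binary search; correct because the normalized names are pairwise distinct.
import Mathlib
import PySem

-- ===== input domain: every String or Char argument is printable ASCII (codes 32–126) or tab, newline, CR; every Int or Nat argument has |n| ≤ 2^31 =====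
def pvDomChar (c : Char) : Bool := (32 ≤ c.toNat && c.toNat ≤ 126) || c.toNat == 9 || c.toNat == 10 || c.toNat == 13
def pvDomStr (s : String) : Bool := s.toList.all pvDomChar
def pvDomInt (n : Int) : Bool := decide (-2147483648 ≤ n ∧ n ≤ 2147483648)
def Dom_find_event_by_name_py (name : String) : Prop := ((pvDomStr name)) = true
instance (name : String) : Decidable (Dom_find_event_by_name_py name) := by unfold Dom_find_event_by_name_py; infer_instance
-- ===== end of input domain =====

-- B replaces A's per-call linear scan with a one-time sorted index of (normalized name, event)
-- pairs queried by a hand-written binary search (bisect_left); same result, different algorithm.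

-- ===== PORT A =====
def pvEVENTS : List (List (String × String)) :=
  [ [("name", "Community Clean-Up"), ("date", "2025-12-15"), ("location", "Central Park")],
    [("name", "Food Drive"), ("date", "2025-12-20"), ("location", "Community Center")],
    [("name", "Charity Concert"), ("date", "2025-12-25"), ("location", "City Hall")],
    [("name", "Soup Kitchen"), ("date", "2025-10-16"), ("location", "Some building")],
    [("name", "Plant Trees"), ("date", "2025-10-15"), ("location", "Pleasant Park")],
    [("name", "Charity Run"), ("date", "2025-11-15"), ("location", "Camp Nou")] ]

-- e["name"]: first-match lookup in the assoc list (KeyError unreachable: every literal event has "name")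
def pvDGet (e : List (String × String)) (k : String) : String :=
  match e.find? (fun p => p.1 == k) with
  | some p => p.2
  | none => ""

def pvFindLoop (key : String) : List (List (String × String)) → Option (List (String × String))
  | [] => none
  | e :: rest =>
      if PySem.Str.lower (PySem.Str.strip (pvDGet e "name")) == key then some e
      else pvFindLoop key rest

def find_event_by_name_py (name : String) : Option (List (String × String)) :=
  if name == "" then none
  else pvFindLoop (PySem.Str.lower (PySem.Str.strip name)) pvEVENTS

-- ===== PORT B =====
-- _SORTED_EVENTS = sorted(((e["name"].strip().lower(), e) for e in EVENTS), key=lambda p: p[0])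
def pvSORTED : List (String × List (String × String)) :=
  PySem.List.sorted (pvEVENTS.map (fun e => (PySem.Str.lower (PySem.Str.strip (pvDGet e "name")), e)))
    (fun p => p.1) false

-- the while loop: lo, hi with mid = (lo+hi)//2; fuel = hi-lo bounds the iteration count and never
-- runs out.  Python's '<' on str is lexicographic codepoint order = '<' on the char lists (exact).
def pvBisect (arr : List (String × List (String × String))) (key : String) : Nat → Nat → Nat → Nat
  | 0, lo, _ => lo
  | f+1, lo, hi =>
      if lo < hi then
        let mid := (lo + hi) / 2
        if (arr.getD mid ("", [])).1.toList < key.toList then pvBisect arr key f (mid+1) hi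
        else pvBisect arr key f lo mid
      else lo

def find_event_by_name_py_alt (name : String) : Option (List (String × String)) :=
  if name == "" then none
  else
    let key := PySem.Str.lower (PySem.Str.strip name)
    let lo := pvBisect pvSORTED key pvSORTED.length 0 pvSORTED.length
    if lo < pvSORTED.length then
      let p := pvSORTED.getD lo ("", [])
      if p.1 == key then some p.2 else none
    else none

-- ===== PRECONDITION & SPEC =====
def Spec_find_event_by_name_py (name : String) (out : Option (List (String × String))) : Prop := out = find_event_by_name_py_alt name
instance (name : String) (out : Option (List (String × String))) : Decidable (Spec_find_event_by_name_py name out) := by unfold Spec_find_event_by_name_py; infer_instance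

-- ===== CLAIM (what is proved, stated in full; the proofs are below) =====
def Claim_equal_find_event_by_name_py : Prop := ∀ (name : String), Dom_find_event_by_name_py name → Spec_find_event_by_name_py name (find_event_by_name_py name)

-- ===== LEMMAS AND PROOFS =====

-- the sorted index, written out
theorem pvSORTED_eq : pvSORTED =
  [ ("charity concert", [("name", "Charity Concert"), ("date", "2025-12-25"), ("location", "City Hall")]),
    ("charity run", [("name", "Charity Run"), ("date", "2025-11-15"), ("location", "Camp Nou")]),
    ("community clean-up", [("name", "Community Clean-Up"), ("date", "2025-12-15"), ("location", "Central Park")]),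
    ("food drive", [("name", "Food Drive"), ("date", "2025-12-20"), ("location", "Community Center")]),
    ("plant trees", [("name", "Plant Trees"), ("date", "2025-10-15"), ("location", "Pleasant Park")]),
    ("soup kitchen", [("name", "Soup Kitchen"), ("date", "2025-10-16"), ("location", "Some building")]) ] := by
  have hmap : pvEVENTS.map (fun e => (PySem.Str.lower (PySem.Str.strip (pvDGet e "name")), e)) =
    [ ("community clean-up", [("name", "Community Clean-Up"), ("date", "2025-12-15"), ("location", "Central Park")]),
      ("food drive", [("name", "Food Drive"), ("date", "2025-12-20"), ("location", "Community Center")]),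
      ("charity concert", [("name", "Charity Concert"), ("date", "2025-12-25"), ("location", "City Hall")]),
      ("soup kitchen", [("name", "Soup Kitchen"), ("date", "2025-10-16"), ("location", "Some building")]),
      ("plant trees", [("name", "Plant Trees"), ("date", "2025-10-15"), ("location", "Pleasant Park")]),
      ("charity run", [("name", "Charity Run"), ("date", "2025-11-15"), ("location", "Camp Nou")]) ] := by decide
  unfold pvSORTED
  rw [hmap]
  refine PySem.List.sorted_eq_of_perm_of_pairwise_lt _ _ (fun p : String × List (String × String) => p.1) ?_ ?_
  · decide
  · simp only [String.lt_iff_toList_lt]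
    decide

-- linear scan and binary search find the same (unique) entry, for every key
theorem pvScan_eq_bisect (key : String) :
    pvFindLoop key pvEVENTS =
      (let lo := pvBisect pvSORTED key pvSORTED.length 0 pvSORTED.length
       if lo < pvSORTED.length then
         let p := pvSORTED.getD lo ("", [])
         if p.1 == key then some p.2 else none
       else none) := by
  have e1 : PySem.Str.lower (PySem.Str.strip "Community Clean-Up") = "community clean-up" := by decide
  have e2 : PySem.Str.lower (PySem.Str.strip "Food Drive") = "food drive" := by decide
  have e3 : PySem.Str.lower (PySem.Str.strip "Charity Concert") = "charity concert" := by decide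
  have e4 : PySem.Str.lower (PySem.Str.strip "Soup Kitchen") = "soup kitchen" := by decide
  have e5 : PySem.Str.lower (PySem.Str.strip "Plant Trees") = "plant trees" := by decide
  have e6 : PySem.Str.lower (PySem.Str.strip "Charity Run") = "charity run" := by decide
  by_cases h1 : key = "community clean-up"; · subst h1; rw [pvSORTED_eq]; decide
  by_cases h2 : key = "food drive"; · subst h2; rw [pvSORTED_eq]; decide
  by_cases h3 : key = "charity concert"; · subst h3; rw [pvSORTED_eq]; decide
  by_cases h4 : key = "soup kitchen"; · subst h4; rw [pvSORTED_eq]; decide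
  by_cases h5 : key = "plant trees"; · subst h5; rw [pvSORTED_eq]; decide
  by_cases h6 : key = "charity run"; · subst h6; rw [pvSORTED_eq]; decide
  -- key matches no event: the scan falls through and the search's final equality test fails
  have n1 : ("community clean-up" : String) ≠ key := fun h => h1 h.symm
  have n2 : ("food drive" : String) ≠ key := fun h => h2 h.symm
  have n3 : ("charity concert" : String) ≠ key := fun h => h3 h.symm
  have n4 : ("soup kitchen" : String) ≠ key := fun h => h4 h.symm
  have n5 : ("plant trees" : String) ≠ key := fun h => h5 h.symm
  have n6 : ("charity run" : String) ≠ key := fun h => h6 h.symm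
  have hscan : pvFindLoop key pvEVENTS = none := by
    simp [pvEVENTS, pvFindLoop, pvDGet, e1, e2, e3, e4, e5, e6, n1, n2, n3, n4, n5, n6]
  rw [hscan]
  generalize pvBisect pvSORTED key pvSORTED.length 0 pvSORTED.length = lo
  rcases Nat.lt_or_ge lo pvSORTED.length with hlo | hlo
  · rw [pvSORTED_eq] at hlo ⊢
    simp only [List.length] at hlo
    interval_cases lo <;> simp [n1, n2, n3, n4, n5, n6]
  · simp [Nat.not_lt.mpr hlo]

-- ===== VERDICT (by name: the statement is the Claim_ definition above) =====
theorem find_event_by_name_py_spec : Claim_equal_find_event_by_name_py := by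
  intro name _
  unfold Spec_find_event_by_name_py find_event_by_name_py find_event_by_name_py_alt
  by_cases h : name == ""
  · simp [h]
  · simp only [h, Bool.false_eq_true, if_false]
    exact pvScan_eq_bisect _
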